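-- pv_equiv track=rewrite | github.com/marcocaba/myFirtsPython | myFirstPythonProyect/miscelanecadenas.py | cuatrovocales
-- ===== SOURCE A (Python) =====
-- def cuatrovocales(frase):
--     palabras = frase.lower().split()
--     contador_palabras = 0
--     vocales = set("aeiou")
--
--     for palabra in palabras:
--         vocales_palabras = set(c for c in palabra if c in vocales)
--         if len(vocales_palabras) >= 4:
--             contador_palabras += 1
--
--     return contador_palabras
-- ===== SOURCE B (Python) =====
-- def cuatrovocales(frase):
--     # Single streaming pass over characters: no split(), no per-word set object.
--     # 'vistas' accumulates the distinct vowels of the current word; whitespace flushes it.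
--     contador = 0
--     vistas = ""
--     for c in frase.lower() + " ":
--         if c.isspace():
--             if len(vistas) >= 4:
--                 contador += 1
--             vistas = ""
--         elif c in "aeiou" and c not in vistas:
--             vistas += c
--     return contador
-- ===== Notes on version B (the rewrite author's own statement) =====
-- stated objective: alternative
-- what changed: B replaces A's split-into-words-then-build-a-set-per-word scheme by a single character-level streaming scan that accumulates the current word's distinct vowels in an accumulator and flushes the count at each whitespace boundary, never calling split() or building a set object.
import Mathlib
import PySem

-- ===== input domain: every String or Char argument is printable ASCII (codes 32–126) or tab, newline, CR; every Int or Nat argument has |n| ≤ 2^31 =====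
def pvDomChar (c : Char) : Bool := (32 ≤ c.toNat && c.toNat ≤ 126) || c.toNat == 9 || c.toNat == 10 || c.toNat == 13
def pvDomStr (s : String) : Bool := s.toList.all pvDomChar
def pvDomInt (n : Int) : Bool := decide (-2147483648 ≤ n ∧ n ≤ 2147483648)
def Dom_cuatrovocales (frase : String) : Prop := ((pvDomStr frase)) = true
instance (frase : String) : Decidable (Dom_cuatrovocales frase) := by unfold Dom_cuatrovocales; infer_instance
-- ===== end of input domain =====

-- B replaces split()-then-set-per-word by one character-level streaming scan flushing at whitespace; return value only, no side effects.
-- ===== PORT A =====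
def cuatrovocales (frase : String) : Int :=
  let palabras := PySem.Str.split₀ (PySem.Str.lower frase)
  let vocales : PySem.Set Char := PySem.Set.ofList "aeiou".toList
  palabras.foldl (fun contador palabra =>
    let vocales_palabras : PySem.Set Char :=
      PySem.Set.ofList (palabra.toList.filter (fun c => PySem.Set.contains vocales c))
    if PySem.Set.len vocales_palabras ≥ 4 then contador + 1 else contador) 0

-- ===== PORT B =====
-- one loop-body step of B: state = (contador, vistas)
def pvBStep (st : Int × List Char) (c : Char) : Int × List Char :=
  if PySem.Chars.isspace c then
    (if (st.2.length : Int) ≥ 4 then st.1 + 1 else st.1, [])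
  else if PySem.Chars.isIn [c] "aeiou".toList && !(PySem.Chars.isIn [c] st.2) then
    (st.1, st.2 ++ [c])
  else st

def cuatrovocales_alt (frase : String) : Int :=
  (((PySem.Str.lower frase).toList ++ [' ']).foldl pvBStep ((0 : Int), ([] : List Char))).1

-- ===== PRECONDITION & SPEC =====
def Spec_cuatrovocales (frase : String) (out : Int) : Prop := out = cuatrovocales_alt frase
instance (frase : String) (out : Int) : Decidable (Spec_cuatrovocales frase out) := by unfold Spec_cuatrovocales; infer_instance

-- ===== CLAIM (what is proved, stated in full; the proofs are below) =====
def Claim_equal_cuatrovocales : Prop := ∀ (frase : String), Dom_cuatrovocales frase → Spec_cuatrovocales frase (cuatrovocales frase)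

-- ===== LEMMAS AND PROOFS =====
-- B's per-character vowel update, and the distinct-vowel list of a word
def pvVstep (vs : List Char) (c : Char) : List Char :=
  if PySem.Chars.isIn [c] "aeiou".toList && !(PySem.Chars.isIn [c] vs) then vs ++ [c] else vs
def pvDv (w : List Char) : List Char := w.foldl pvVstep []
-- A's per-word counter update, phrased through pvDv
def pvAstep (k : Int) (w : List Char) : Int := if ((pvDv w).length : Int) ≥ 4 then k + 1 else k

lemma singleton_isIn_iff (v : Char) (s : List Char) : PySem.Chars.isIn [v] s = true ↔ v ∈ s := by
  rw [PySem.Chars.isIn_iff_infix]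
  constructor
  · intro h; exact h.mem (by simp)
  · intro h
    obtain ⟨l, r, rfl⟩ := List.append_of_mem h
    exact ⟨l, r, by simp⟩

lemma vstep_eq (vs : List Char) (c : Char) :
    pvVstep vs c =
      if PySem.Set.contains (PySem.Set.ofList "aeiou".toList) c = true then PySem.Set.add vs c else vs := by
  have hv : (PySem.Set.ofList "aeiou".toList) = "aeiou".toList := by decide
  have b2 : (PySem.Chars.isIn [c] vs = false) ↔ c ∉ vs := by
    rw [← Bool.not_eq_true, singleton_isIn_iff]
  simp only [pvVstep, hv, PySem.Set.contains, PySem.Set.add, List.contains_eq_mem]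
  by_cases h1 : c ∈ "aeiou".toList <;> by_cases h2 : c ∈ vs <;>
    simp [h2, singleton_isIn_iff, b2]

lemma dv_eq_ofList (w : List Char) :
    PySem.Set.ofList (w.filter (fun c => PySem.Set.contains (PySem.Set.ofList "aeiou".toList) c)) = pvDv w := by
  unfold PySem.Set.ofList pvDv
  rw [List.foldl_filter]
  refine PySem.List.foldl_congr_mem _ _ _ _ ?_
  intro b a _
  rw [vstep_eq]
  rfl

lemma astep_eq (k : Int) (w : List Char) :
    (if PySem.Set.len (PySem.Set.ofList (w.filter
        (fun c => PySem.Set.contains (PySem.Set.ofList "aeiou".toList) c))) ≥ 4 then k + 1 else k)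
      = pvAstep k w := by
  unfold pvAstep
  rw [dv_eq_ofList]
  rfl

-- extending the current word by a non-space character updates B's accumulator by pvVstep
lemma dv_snoc (w : List Char) (c : Char) : pvDv (w ++ [c]) = pvVstep (pvDv w) c := by
  simp [pvDv]

-- the accumulator of split₀.go only prefixes the result
lemma go_acc (s : List Char) : ∀ (cur : List Char) (acc : List (List Char)),
    PySem.Chars.split₀.go s cur acc = acc.reverse ++ PySem.Chars.split₀.go s cur [] := by
  induction s with
  | nil =>
    intro cur acc
    simp only [PySem.Chars.split₀.go]
    by_cases h : cur.isEmpty <;> simp [h]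
  | cons c rest ih =>
    intro cur acc
    simp only [PySem.Chars.split₀.go]
    by_cases hs : PySem.Chars.isspace c
    · by_cases h : cur.isEmpty <;> simp only [hs, h, if_true, if_false, Bool.false_eq_true]
      · exact ih [] acc
      · rw [ih [] ((cur.reverse :: acc)), ih [] [cur.reverse]]
        simp
    · simp only [hs, Bool.false_eq_true, if_false]
      exact ih (c :: cur) acc

-- main invariant: B's streaming fold over "s + ' '" computes A's per-word fold over split₀.go s cur []
lemma main_inv (s : List Char) : ∀ (cur : List Char) (k : Int),
    (List.foldl pvBStep (k, pvDv cur.reverse) (s ++ [' '])).1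
      = List.foldl pvAstep k (PySem.Chars.split₀.go s cur []) := by
  induction s with
  | nil =>
    intro cur k
    have hsp : PySem.Chars.isspace ' ' = true := by decide
    simp only [List.nil_append, List.foldl_cons, List.foldl_nil, PySem.Chars.split₀.go]
    rw [show pvBStep (k, pvDv cur.reverse) ' '
        = (if ((pvDv cur.reverse).length : Int) ≥ 4 then k + 1 else k, []) from by
      simp [pvBStep, hsp]]
    by_cases h : cur.isEmpty = true
    · have hc : cur = [] := by cases cur <;> simp_all
      subst hc
      rw [if_pos h]
      simp [pvDv]
    · rw [if_neg h]
      simp [pvAstep]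
  | cons c rest ih =>
    intro cur k
    simp only [List.cons_append, List.foldl_cons, PySem.Chars.split₀.go]
    by_cases hs : PySem.Chars.isspace c
    · rw [show pvBStep (k, pvDv cur.reverse) c
          = (if ((pvDv cur.reverse).length : Int) ≥ 4 then k + 1 else k, []) from by
        simp [pvBStep, hs]]
      rw [if_pos hs]
      by_cases h : cur.isEmpty = true
      · have hc : cur = [] := by cases cur <;> simp_all
        subst hc
        rw [if_pos h,
          show (if ((pvDv ([] : List Char).reverse).length : Int) ≥ 4 then k + 1 else k) = k from by
            simp [pvDv]]
        simpa [pvDv] using ih [] k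
      · rw [if_neg h, go_acc rest [] [cur.reverse]]
        simp only [List.reverse_cons, List.reverse_nil, List.nil_append, List.singleton_append,
          List.foldl_cons]
        rw [show (if ((pvDv cur.reverse).length : Int) ≥ 4 then k + 1 else k)
            = pvAstep k cur.reverse from rfl]
        simpa [pvDv] using ih [] (pvAstep k cur.reverse)
    · rw [show pvBStep (k, pvDv cur.reverse) c = (k, pvDv ((c :: cur).reverse)) from by
        simp only [List.reverse_cons, dv_snoc]
        simp only [pvBStep, hs, Bool.false_eq_true, if_false, pvVstep]
        split_ifs with h1 <;> simp_all]
      rw [if_neg (by simp [hs])]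
      exact ih (c :: cur) k

-- ===== VERDICT =====
theorem cuatrovocales_spec : Claim_equal_cuatrovocales := by
  intro frase _
  unfold Spec_cuatrovocales cuatrovocales cuatrovocales_alt
  have hb := main_inv (PySem.Str.lower frase).toList [] 0
  simp only [pvDv, List.foldl_nil, List.reverse_nil] at hb
  rw [hb]
  have hmap : (PySem.Str.split₀ (PySem.Str.lower frase)).map String.toList
      = PySem.Chars.split₀ (PySem.Str.lower frase).toList := by
    simp [pysem]
  have hgo : PySem.Chars.split₀.go (PySem.Str.lower frase).toList [] []
      = PySem.Chars.split₀ (PySem.Str.lower frase).toList := rfl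
  rw [hgo, ← hmap, List.foldl_map]
  refine PySem.List.foldl_congr_mem _ _ _ _ ?_
  intro b a _
  exact astep_eq b a.toList
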